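-- pv_equiv track=rewrite | github.com/Benasking7124/VSLAM_CVFinalProject | bounding_box_association.py | Count_Matching_Features
-- ===== SOURCE A (Python) =====
-- def Count_Matching_Features(feature_points, left_features, right_features):
--
--     # Convert feature_points to a set of tuples
--     feature_points_set = {tuple(point) for point in feature_points}
--
--     # Convert left_features and right_features to sets of tuples
--     left_features_set = {tuple(feature[:2]) for feature in left_features}
--     right_features_set = {tuple(feature[:2]) for feature in right_features}
--
--     # Calculate the intersection of left_features_set and right_features_set
--     matching_pairs = left_features_set & right_features_set
--
--     # Initialize match count
--     match_count = 0
--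
--     # Iterate over the matching pairs
--     for left_feature in matching_pairs:
--         left_x, left_y = left_feature
--
--         # Iterate over feature_points_set to find matching pairs
--         for right_feature in right_features_set:
--             right_x, right_y = right_feature
--
--             # Check if the matching pair exists in feature_points_set
--             if (left_x, left_y, right_x, right_y) in feature_points_set:
--                 match_count += 1
--
--     # Return the match count
--     return match_count
-- ===== SOURCE B (Python) =====
-- def Count_Matching_Features(feature_points, left_features, right_features):
--     right_set = {tuple(f[:2]) for f in right_features}
--     matching_pairs = {tuple(f[:2]) for f in left_features} & right_set
--
--     # Index the deduplicated feature points: first half -> list of second halves.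
--     halves = [(p[:2], p[2:]) for p in {tuple(point) for point in feature_points}]
--     index = {}
--     for head, tail in halves:
--         index[head] = index.get(head, []) + [tail]
--
--     total = 0
--     for pair in matching_pairs:
--         for tail in index.get(pair, []):
--             if tail in right_set:
--                 total += 1
--     return total
-- ===== Notes on version B (the rewrite author's own statement) =====
-- stated objective: alternative
-- what changed: Instead of scanning matching_pairs x right_features_set and probing concatenated 4-tuples against the feature-point set, B first builds an index dict mapping each feature point's first half to the list of its second halves, then for each matching pair iterates only the indexed second halves and counts those lying in right_features_set.
import Mathlib
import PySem

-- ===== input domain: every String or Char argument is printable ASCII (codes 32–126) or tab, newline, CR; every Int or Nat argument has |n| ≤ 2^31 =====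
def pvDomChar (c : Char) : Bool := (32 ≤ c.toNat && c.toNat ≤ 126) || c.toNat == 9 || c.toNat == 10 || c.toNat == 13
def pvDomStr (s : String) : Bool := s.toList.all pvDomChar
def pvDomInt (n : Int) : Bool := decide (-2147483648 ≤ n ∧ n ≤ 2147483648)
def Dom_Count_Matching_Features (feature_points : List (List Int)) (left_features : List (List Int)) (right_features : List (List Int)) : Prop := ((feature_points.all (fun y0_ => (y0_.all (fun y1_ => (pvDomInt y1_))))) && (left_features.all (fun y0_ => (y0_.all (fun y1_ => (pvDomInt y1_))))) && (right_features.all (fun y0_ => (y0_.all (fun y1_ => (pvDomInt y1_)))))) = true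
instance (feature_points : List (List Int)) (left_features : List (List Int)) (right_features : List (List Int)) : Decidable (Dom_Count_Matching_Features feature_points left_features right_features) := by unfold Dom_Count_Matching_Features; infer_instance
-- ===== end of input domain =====

-- B replaces A's nested scan over matching_pairs × right_features_set by first building an
-- index dict (first half of a feature point → its second halves) and counting through it
-- (objective: alternative algorithm / data structure).


-- ===== PORT A =====
-- A tuple of ints is modelled as List Int; the Python 4-tuple (left_x, left_y, right_x, right_y)
-- is L ++ R, exact because under Pre_ every element of matching_pairs and of
-- right_features_set has exactly two elements.
def Count_Matching_Features (feature_points : List (List Int)) (left_features : List (List Int)) (right_features : List (List Int)) : Int :=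
  let feature_points_set : PySem.Set (List Int) := PySem.Set.ofList feature_points
  let left_features_set : PySem.Set (List Int) := PySem.Set.ofList (left_features.map (fun f => PySem.List.slice f none (some 2)))
  let right_features_set : PySem.Set (List Int) := PySem.Set.ofList (right_features.map (fun f => PySem.List.slice f none (some 2)))
  let matching_pairs : PySem.Set (List Int) := PySem.Set.inter left_features_set right_features_set
  matching_pairs.foldl (fun match_count L =>
    right_features_set.foldl (fun acc R =>
      if PySem.Set.contains feature_points_set (L ++ R) then acc + 1 else acc) match_count) 0

-- ===== PORT B =====
def Count_Matching_Features_alt (feature_points : List (List Int)) (left_features : List (List Int)) (right_features : List (List Int)) : Int :=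
  let right_set : PySem.Set (List Int) := PySem.Set.ofList (right_features.map (fun f => PySem.List.slice f none (some 2)))
  let matching_pairs : PySem.Set (List Int) :=
    PySem.Set.inter (PySem.Set.ofList (left_features.map (fun f => PySem.List.slice f none (some 2)))) right_set
  let halves : List (List Int × List Int) :=
    (PySem.Set.ofList feature_points).map (fun p => (PySem.List.slice p none (some 2), PySem.List.slice p (some 2) none))
  -- index[head] = index.get(head, []) + [tail]
  let index : PySem.Dict (List Int) (List (List Int)) :=
    halves.foldl (fun d pr => d.modify pr.1 [] (fun ts => ts ++ [pr.2])) PySem.Dict.empty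
  matching_pairs.foldl (fun total pair =>
    total + (index.getD pair []).foldl (fun s tail =>
      if PySem.Set.contains right_set tail then s + 1 else s) 0) 0

-- ===== PRECONDITION & SPEC =====
-- Pre_ excludes exactly the inputs on which A raises (a ValueError from unpacking a short
-- tuple): some left and right 2-truncations coincide (so matching_pairs is nonempty) while
-- some right feature has fewer than two coordinates. A returns on every other input.
def Pre_Count_Matching_Features (feature_points : List (List Int)) (left_features : List (List Int)) (right_features : List (List Int)) : Prop :=
  (∃ l ∈ left_features, ∃ r ∈ right_features, l.take 2 = r.take 2) → ∀ r ∈ right_features, 2 ≤ r.length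
instance (feature_points : List (List Int)) (left_features : List (List Int)) (right_features : List (List Int)) : Decidable (Pre_Count_Matching_Features feature_points left_features right_features) := by unfold Pre_Count_Matching_Features; infer_instance
def pvWitness_Count_Matching_Features : List (List Int) × List (List Int) × List (List Int) :=
  ([[1, 2, 3, 4], [5, 6, 7, 8]], [[1, 2], [9, 9]], [[1, 2, 0], [3, 4]])

def Spec_Count_Matching_Features (feature_points : List (List Int)) (left_features : List (List Int)) (right_features : List (List Int)) (out : Int) : Prop := out = Count_Matching_Features_alt feature_points left_features right_features
instance (feature_points : List (List Int)) (left_features : List (List Int)) (right_features : List (List Int)) (out : Int) : Decidable (Spec_Count_Matching_Features feature_points left_features right_features out) := by unfold Spec_Count_Matching_Features; infer_instance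

-- ===== CLAIM (what is proved, stated in full; the proofs are below) =====
def Claim_equal_Count_Matching_Features : Prop := ∀ (feature_points : List (List Int)) (left_features : List (List Int)) (right_features : List (List Int)), Dom_Count_Matching_Features feature_points left_features right_features → Pre_Count_Matching_Features feature_points left_features right_features → Spec_Count_Matching_Features feature_points left_features right_features (Count_Matching_Features feature_points left_features right_features)

-- ===== LEMMAS AND PROOFS =====

-- for a fixed matching pair L, A's scan over Rt counts exactly the feature points in F
-- that split as L ++ (something in Rt)
theorem pv_count_slice (F Rt : List (List Int)) (hF : F.Nodup) (hRt : Rt.Nodup)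
    (hR : ∀ R ∈ Rt, R.length = 2) (L : List Int) (hL : L.length = 2) :
    Rt.countP (fun R => decide ((L ++ R) ∈ F))
      = F.countP (fun P => (P.take 2 == L) && decide (P.drop 2 ∈ Rt)) := by
  rw [List.countP_eq_length_filter, List.countP_eq_length_filter]
  have hinj : Function.Injective (fun R : List Int => L ++ R) := fun a b h => by
    simpa using List.append_cancel_left h
  have hperm : ((Rt.filter (fun R => decide ((L ++ R) ∈ F))).map (fun R => L ++ R)).Perm
      (F.filter (fun P => (P.take 2 == L) && decide (P.drop 2 ∈ Rt))) := by
    rw [List.perm_ext_iff_of_nodup ((hRt.filter _).map hinj) (hF.filter _)]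
    intro a
    simp only [List.mem_map, List.mem_filter, decide_eq_true_eq, Bool.and_eq_true, beq_iff_eq]
    constructor
    · rintro ⟨R, ⟨hRmem, hin⟩, rfl⟩
      refine ⟨hin, ?_, ?_⟩
      · rw [← hL]; exact List.take_left
      · rw [← hL, List.drop_left]; exact hRmem
    · rintro ⟨haF, htake, hdrop⟩
      exact ⟨a.drop 2, ⟨hdrop, by rw [← htake, List.take_append_drop]; exact haF⟩,
        by rw [← htake, List.take_append_drop]⟩
  calc (Rt.filter (fun R => decide ((L ++ R) ∈ F))).length
      = ((Rt.filter (fun R => decide ((L ++ R) ∈ F))).map (fun R => L ++ R)).length := by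
        rw [List.length_map]
    _ = _ := hperm.length_eq

theorem pv_main (feature_points left_features right_features : List (List Int))
    (hpre : (∃ l ∈ left_features, ∃ r ∈ right_features, l.take 2 = r.take 2) → ∀ r ∈ right_features, 2 ≤ r.length) :
    Count_Matching_Features feature_points left_features right_features
      = Count_Matching_Features_alt feature_points left_features right_features := by
  have hsl2 : ∀ f : List Int, PySem.List.slice f none (some 2) = f.take 2 := fun f => by
    simp [pysem]
  have hsld : ∀ f : List Int, PySem.List.slice f (some 2) none = f.drop 2 := fun f => by
    simp [pysem]
  have hc : ∀ (s : List (List Int)) (x : List Int), PySem.Set.contains s x = decide (x ∈ s) := by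
    intro s x
    by_cases h : x ∈ s
    · simp only [h, decide_true]; exact (PySem.Set.contains_iff s x).mpr h
    · simp only [h, decide_false]
      cases hcb : PySem.Set.contains s x
      · rfl
      · exact absurd ((PySem.Set.contains_iff s x).mp hcb) h
  unfold Count_Matching_Features Count_Matching_Features_alt
  simp only [hsl2, hsld, hc]
  set F : List (List Int) := PySem.Set.ofList feature_points with hFdef
  set Lt : List (List Int) := PySem.Set.ofList (left_features.map (fun f => f.take 2)) with hLtdef
  set Rt : List (List Int) := PySem.Set.ofList (right_features.map (fun f => f.take 2)) with hRtdef
  set M : List (List Int) := PySem.Set.inter Lt Rt with hMdef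
  -- A's side: a sum over M of inner counts
  have houterA : (fun (mc : Int) (L : List Int) =>
      Rt.foldl (fun acc R => if decide ((L ++ R) ∈ F) then acc + 1 else acc) mc)
      = fun mc L => mc + ((Rt.countP (fun R => decide ((L ++ R) ∈ F)) : Nat) : Int) := by
    funext mc L
    exact PySem.List.foldl_if_add_one _ Rt mc
  rw [houterA, PySem.List.foldl_add, PySem.List.foldl_add]
  simp only [zero_add]
  -- B's side: each bucket count is a countP over F
  have hbucket : ∀ L : List Int,
      (((F.map (fun p => (p.take 2, p.drop 2))).foldl
          (fun d pr => d.modify pr.1 ([] : List (List Int)) (fun ts => ts ++ [pr.2]))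
          PySem.Dict.empty).getD L []).foldl
        (fun s tail => if decide (tail ∈ Rt) then s + 1 else s) (0 : Int)
      = ((F.countP (fun P => (P.take 2 == L) && decide (P.drop 2 ∈ Rt)) : Nat) : Int) := by
    intro L
    rw [PySem.Dict.getD_foldl_modify_append, PySem.List.foldl_if_add_one]
    simp only [PySem.Dict.getD_empty, List.nil_append, zero_add, List.countP_map,
      List.countP_filter, Nat.cast_inj]
    apply List.countP_congr
    intro P _
    simp only [Function.comp]
    cases h1 : (P.take 2 == L) <;> cases h2 : decide (P.drop 2 ∈ Rt) <;> simp_all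
  -- both are now sums over M; compare pointwise
  congr 1
  apply List.map_congr_left
  intro L hLm
  rw [hbucket L]
  norm_cast
  -- L ∈ M gives the length facts via Pre_
  have hL' := (PySem.Set.mem_inter Lt Rt L).mp (hMdef ▸ hLm)
  have hex : ∃ l ∈ left_features, ∃ r ∈ right_features, l.take 2 = r.take 2 := by
    obtain ⟨hl, hr⟩ := hL'
    obtain ⟨l, hlmem, hleq⟩ := List.mem_map.mp ((PySem.Set.mem_ofList _ _).mp hl)
    obtain ⟨r, hrmem, hreq⟩ := List.mem_map.mp ((PySem.Set.mem_ofList _ _).mp hr)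
    exact ⟨l, hlmem, r, hrmem, by rw [hleq, hreq]⟩
  have hlen := hpre hex
  have hR : ∀ R ∈ Rt, R.length = 2 := by
    intro R hRm
    obtain ⟨r, hrmem, hreq⟩ := List.mem_map.mp ((PySem.Set.mem_ofList _ _).mp (hRtdef ▸ hRm))
    have := hlen r hrmem
    rw [← hreq, List.length_take]; omega
  have hL2 : L.length = 2 := hR L hL'.2
  exact pv_count_slice F Rt (PySem.Set.nodup_ofList _) (PySem.Set.nodup_ofList _) hR L hL2

-- ===== VERDICT (by name: the statement is the Claim_ definition above) =====
theorem Count_Matching_Features_spec : Claim_equal_Count_Matching_Features := by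
  intro feature_points left_features right_features _hdom hpre
  unfold Pre_Count_Matching_Features at hpre
  unfold Spec_Count_Matching_Features
  exact pv_main feature_points left_features right_features hpre
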